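-- pv_equiv track=rewrite | github.com/a-brandon/practice | edabit/first_letter_shift.py | shift_sentence
-- ===== SOURCE A (Python) =====
-- def shift_sentence(txt):
--     words = txt.split()
--     shifts = []
--     for i, curr_word in enumerate(words):
--         prev, curr_letters = words[i - 1], list(curr_word)
--         curr_letters[0] = prev[0]
--         shifts.append(''.join(curr_letters))
--     return ' '.join(shifts)
-- ===== SOURCE B (Python) =====
-- def shift_sentence(txt):
--     words = txt.split()
--     if not words:
--         return ''
--     # Flat-buffer algorithm: normalize the sentence into one character buffer,
--     # compute each word's start offset by a running prefix sum, then do a single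
--     # in-place swap sweep over those offsets carrying one character (seeded with
--     # the last word's first letter, which realises the cyclic shift).
--     chars = list(' '.join(words))
--     starts = [0]
--     for w in words[:-1]:
--         starts.append(starts[-1] + len(w) + 1)
--     carry = chars[starts[-1]]
--     for s in starts:
--         chars[s], carry = carry, chars[s]
--     return ''.join(chars)
-- ===== Notes on version B (the rewrite author's own statement) =====
-- stated objective: alternative
-- what changed: B works on a different data structure: it normalizes the sentence into one flat character buffer, computes each word's start offset by a prefix sum, and shifts the first letters with a single in-place carry swap sweep over those offsets, instead of A's per-word list surgery with a backward index into the word list.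
import Mathlib
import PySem

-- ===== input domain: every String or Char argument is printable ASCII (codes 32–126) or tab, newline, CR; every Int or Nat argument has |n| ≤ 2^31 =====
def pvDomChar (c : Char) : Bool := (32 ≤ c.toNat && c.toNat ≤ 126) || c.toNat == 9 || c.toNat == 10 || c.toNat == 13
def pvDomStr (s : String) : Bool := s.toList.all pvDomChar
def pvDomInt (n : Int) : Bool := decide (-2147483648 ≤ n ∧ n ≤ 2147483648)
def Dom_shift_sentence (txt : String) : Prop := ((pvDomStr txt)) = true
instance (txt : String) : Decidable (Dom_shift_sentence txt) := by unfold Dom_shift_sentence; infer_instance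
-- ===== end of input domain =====

-- B normalizes the sentence into one flat character buffer, computes word start
-- offsets by a prefix sum, and does a single in-place carry swap sweep over those
-- offsets, instead of A's per-word rebuild with a backward index; objective:
-- alternative algorithm on a different data structure (same O(n) cost).

-- ===== PORT A =====
-- prev[0] / curr_letters[0] are total here (split() yields nonempty words); ported with
-- the total pyGetD/pySetD forms, exact on every reachable input.
def shift_sentence (txt : String) : String :=
  let words := PySem.Str.split₀ txt
  let shifts := (PySem.List.enumerate words 0).foldl
    (fun shifts iw =>
      let prev := PySem.List.pyGetD words (iw.1 - 1) ""
      let curr_letters :=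
        PySem.List.pySetD iw.2.toList 0 (PySem.List.pyGetD prev.toList 0 ' ')
      shifts ++ [String.ofList curr_letters]) ([] : List String)
  PySem.Str.join " " shifts

-- ===== PORT B =====
-- chars[starts[-1]] / chars[s] / the chars[s] assignment are total here (every offset
-- is a word start inside the buffer); ported with the total pyGetD/pySetD forms.
def shift_sentence_alt (txt : String) : String :=
  let words := PySem.Str.split₀ txt
  if words = [] then ""
  else
    let chars := (PySem.Str.join " " words).toList
    let starts := (PySem.List.slice words none (some (-1))).foldl
      (fun st w => st ++ [PySem.List.pyGetD st (-1) 0 + PySem.Str.len w + 1]) [(0 : Int)]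
    let carry := PySem.List.pyGetD chars (PySem.List.pyGetD starts (-1) 0) ' '
    let res := starts.foldl
      (fun (p : List Char × Char) s =>
        (PySem.List.pySetD p.1 s p.2, PySem.List.pyGetD p.1 s ' ')) (chars, carry)
    String.ofList res.1

-- ===== PRECONDITION & SPEC =====
def Spec_shift_sentence (txt : String) (out : String) : Prop := out = shift_sentence_alt txt
instance (txt : String) (out : String) : Decidable (Spec_shift_sentence txt out) := by unfold Spec_shift_sentence; infer_instance

-- ===== CLAIM =====
def Claim_equal_shift_sentence : Prop := ∀ (txt : String), Dom_shift_sentence txt → Spec_shift_sentence txt (shift_sentence txt)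

-- ===== LEMMAS AND PROOFS =====

-- first letter of a word (total form; all words here are nonempty)
def firstC (w : String) : Char := w.toList.headD ' '

-- the canonical result word list: word i gets the carried letter, carries its own first
def replS : Char → List String → List String
  | _, [] => []
  | c, w :: ws => String.ofList (c :: w.toList.tail) :: replS (firstC w) ws

-- word start offsets in the ' '-joined buffer, from base b
def offsFrom : Nat → List String → List Int
  | _, [] => []
  | b, w :: ws => ((b : Nat) : Int) :: offsFrom (b + w.toList.length + 1) ws

-- offsets as B's foldl builds them: one entry per word of ws PLUS the final base
def offsAux : Nat → List String → List Int
  | b, [] => [((b : Nat) : Int)]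
  | b, w :: ws => ((b : Nat) : Int) :: offsAux (b + w.toList.length + 1) ws

-- B's sweep step: chars[s], carry = carry, chars[s]
def sweepStep (p : List Char × Char) (s : Int) : List Char × Char :=
  (PySem.List.pySetD p.1 s p.2, PySem.List.pyGetD p.1 s ' ')

-- every word produced by str.split() is nonempty
theorem split₀_go_ne_nil (s cur : List Char) (acc : List (List Char))
    (hacc : ∀ w ∈ acc, w ≠ []) :
    ∀ w ∈ PySem.Chars.split₀.go s cur acc, w ≠ [] := by
  induction s generalizing cur acc with
  | nil =>
    intro w hw
    unfold PySem.Chars.split₀.go at hw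
    split_ifs at hw with h
    · exact hacc w (List.mem_reverse.mp hw)
    · rcases List.mem_cons.mp (List.mem_reverse.mp hw) with h' | h'
      · subst h'
        intro hc
        exact h (by simp [List.reverse_eq_nil_iff.mp hc])
      · exact hacc w h'
  | cons c rest ih =>
    intro w hw
    unfold PySem.Chars.split₀.go at hw
    split_ifs at hw with h1 h2
    · exact ih [] acc hacc w hw
    · refine ih [] (cur.reverse :: acc) ?_ w hw
      intro v hv
      rcases List.mem_cons.mp hv with h' | h'
      · subst h'
        intro hc
        exact h2 (by simp [List.reverse_eq_nil_iff.mp hc])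
      · exact hacc v h'
    · exact ih (c :: cur) acc hacc w hw

theorem split₀_words_ne (txt : String) :
    ∀ w ∈ PySem.Str.split₀ txt, w.toList ≠ [] := by
  intro w hw
  unfold PySem.Str.split₀ PySem.Chars.split₀ at hw
  rcases List.mem_map.mp hw with ⟨l, hl, rfl⟩
  have h1 := split₀_go_ne_nil txt.toList [] [] (by simp) l hl
  simpa [String.toList_ofList] using h1

theorem length_replS (c : Char) (ws : List String) : (replS c ws).length = ws.length := by
  induction ws generalizing c with
  | nil => rfl
  | cons w ws ih => simp [replS, ih]

theorem replS_getElem (ws : List String) (c : Char) (k : Nat) (hk : k < ws.length) :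
    (replS c ws)[k]'(by rw [length_replS]; exact hk) =
      String.ofList
        ((if k = 0 then c else firstC (ws[k - 1]'(by omega))) :: (ws[k]'hk).toList.tail) := by
  induction ws generalizing c k with
  | nil => exact absurd hk (by simp)
  | cons w ws ih =>
    cases k with
    | zero => simp [replS]
    | succ j =>
      have hj : j < ws.length := by simpa using hk
      simp only [replS, List.getElem_cons_succ]
      rw [ih (firstC w) j hj]
      cases j with
      | zero => simp
      | succ i => simp


theorem A_core (words : List String) (hne : words ≠ [])
    (hall : ∀ w ∈ words, w.toList ≠ []) :
    (PySem.List.enumerate words 0).map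
      (fun iw => String.ofList
        (PySem.List.pySetD iw.2.toList 0
          (PySem.List.pyGetD (PySem.List.pyGetD words (iw.1 - 1) "").toList 0 ' '))) =
    replS (firstC (words.getLast hne)) words := by
  apply List.ext_getElem
  · simp [length_replS]
  · intro k hk1 hk2
    simp only [List.length_map, PySem.List.length_enumerate] at hk1
    rw [List.getElem_map, PySem.List.getElem_enumerate, replS_getElem words _ k hk1]
    have hwk := hall (words[k]) (List.getElem_mem hk1)
    obtain ⟨d, ds, hds⟩ : ∃ d ds, (words[k]).toList = d :: ds := by
      cases hds : (words[k]).toList with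
      | nil => exact absurd hds hwk
      | cons d ds => exact ⟨d, ds, rfl⟩
    cases k with
    | zero =>
      have hlast := hall (words.getLast hne) (List.getLast_mem hne)
      obtain ⟨e, es, hes⟩ : ∃ e es, (words.getLast hne).toList = e :: es := by
        cases hes : (words.getLast hne).toList with
        | nil => exact absurd hes hlast
        | cons e es => exact ⟨e, es, rfl⟩
      simp only [Nat.cast_zero, add_zero, zero_sub]
      rw [PySem.List.pyGetD_neg_one words "" hne, hds, hes]
      simp [PySem.List.pySetD, PySem.List.pySet?, PySem.List.pyIdx?, firstC, hes]
    | succ j =>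
      have hj : j < words.length := by omega
      simp only [Nat.cast_add, Nat.cast_one]
      rw [show ((0 : Int) + (((j : Nat) : Int) + 1) - 1) = ((j : Nat) : Int) by ring]
      rw [PySem.List.pyGetD_natCast, List.getD_eq_getElem _ _ hj]
      have hwj := hall (words[j]) (List.getElem_mem hj)
      obtain ⟨e, es, hes⟩ : ∃ e es, (words[j]).toList = e :: es := by
        cases hes : (words[j]).toList with
        | nil => exact absurd hes hwj
        | cons e es => exact ⟨e, es, rfl⟩
      rw [hds, hes]
      simp [PySem.List.pySetD, PySem.List.pySet?, PySem.List.pyIdx?, firstC, hes]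


theorem set_at_len (pre tail : List Char) (d c : Char) :
    PySem.List.pySetD (pre ++ d :: tail) ((pre.length : Nat) : Int) c = pre ++ c :: tail := by
  rw [PySem.List.pySetD_natCast, List.set_append]
  simp


theorem get_at_len (pre tail : List Char) (d x : Char) :
    PySem.List.pyGetD (pre ++ d :: tail) ((pre.length : Nat) : Int) x = d := by
  rw [PySem.List.pyGetD_natCast, List.getD_append_right _ _ _ _ (le_refl _)]
  simp


theorem offs_foldl (ws : List String) (acc : List Int) (b : Nat) :
    ws.foldl (fun st w => st ++ [PySem.List.pyGetD st (-1) 0 + PySem.Str.len w + 1])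
      (acc ++ [((b : Nat) : Int)]) = acc ++ offsAux b ws := by
  induction ws generalizing acc b with
  | nil => simp [offsAux]
  | cons w ws ih =>
    simp only [List.foldl_cons]
    rw [PySem.List.pyGetD_neg_one_append_singleton]
    rw [show ((b : Nat) : Int) + PySem.Str.len w + 1
          = (((b + w.toList.length + 1 : Nat)) : Int) by rw [PySem.Str.len_eq]; push_cast; ring]
    rw [List.append_assoc] at *
    rw [show acc ++ ([((b : Nat) : Int)] ++ [(((b + w.toList.length + 1 : Nat)) : Int)])
          = (acc ++ [((b : Nat) : Int)]) ++ [(((b + w.toList.length + 1 : Nat)) : Int)] by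
        simp]
    rw [ih (acc ++ [((b : Nat) : Int)]) (b + w.toList.length + 1)]
    simp [offsAux]


theorem offsAux_dropLast (ws : List String) (hne : ws ≠ []) (b : Nat) :
    offsAux b ws.dropLast = offsFrom b ws := by
  induction ws generalizing b with
  | nil => exact absurd rfl hne
  | cons w ws ih =>
    cases ws with
    | nil => simp [offsAux, offsFrom]
    | cons m r =>
      rw [List.dropLast_cons₂]
      simp only [offsAux, offsFrom]
      rw [ih (by simp)]
      simp [offsFrom]


theorem offsFrom_ne_nil (ws : List String) (hne : ws ≠ []) (b : Nat) :
    offsFrom b ws ≠ [] := by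
  cases ws with
  | nil => exact absurd rfl hne
  | cons w ws => simp [offsFrom]

theorem carry_init (ws : List String) (hne : ws ≠ [])
    (hall : ∀ w ∈ ws, w.toList ≠ []) (pre : List Char) (b : Nat)
    (hb : b = pre.length) (h : offsFrom b ws ≠ []) :
    PySem.List.pyGetD (pre ++ PySem.Chars.join [' '] (ws.map String.toList))
      ((offsFrom b ws).getLast h) ' ' = firstC (ws.getLast hne) := by
  induction ws generalizing pre b with
  | nil => exact absurd rfl hne
  | cons w ws ih =>
    have hw := hall w (by simp)
    obtain ⟨d, ds, hds⟩ : ∃ d ds, w.toList = d :: ds := by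
      cases hds : w.toList with
      | nil => exact absurd hds hw
      | cons d ds => exact ⟨d, ds, rfl⟩
    cases ws with
    | nil =>
      simp only [offsFrom, List.map_cons, List.map_nil, PySem.Chars.join_singleton,
        List.getLast_singleton]
      rw [hb, hds, get_at_len]
      simp [firstC, hds]
    | cons m r =>
      show PySem.List.pyGetD _
          (((((b : Nat) : Int)) :: offsFrom (b + w.toList.length + 1) (m :: r)).getLast h) ' ' = _
      rw [List.getLast_cons (offsFrom_ne_nil (m :: r) (by simp) _)]
      have hih := ih (by simp) (fun v hv => hall v (by simp [hv]))
        (pre ++ w.toList ++ [' ']) (b + w.toList.length + 1)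
        (by simp [hb, Nat.add_assoc]) (offsFrom_ne_nil (m :: r) (by simp) _)
      simp only [List.map_cons] at hih ⊢
      rw [PySem.Chars.join_cons_cons]
      rw [show pre ++ (w.toList ++ [' '] ++ PySem.Chars.join [' '] (m.toList :: List.map String.toList r))
            = (pre ++ w.toList ++ [' ']) ++ PySem.Chars.join [' '] (m.toList :: List.map String.toList r) by
          simp]
      rw [hih, List.getLast_cons (l := m :: r) (by simp)]


theorem sweep_main (ws : List String) (hne : ws ≠ [])
    (hall : ∀ w ∈ ws, w.toList ≠ []) (pre : List Char) (b : Nat)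
    (hb : b = pre.length) (c : Char) :
    (offsFrom b ws).foldl sweepStep
      (pre ++ PySem.Chars.join [' '] (ws.map String.toList), c)
    = (pre ++ PySem.Chars.join [' '] ((replS c ws).map String.toList),
       firstC (ws.getLast hne)) := by
  induction ws generalizing pre b c with
  | nil => exact absurd rfl hne
  | cons w ws ih =>
    have hw := hall w (by simp)
    obtain ⟨d, ds, hds⟩ : ∃ d ds, w.toList = d :: ds := by
      cases hds : w.toList with
      | nil => exact absurd hds hw
      | cons d ds => exact ⟨d, ds, rfl⟩
    cases ws with
    | nil =>
      simp only [offsFrom, List.map_cons, List.map_nil, PySem.Chars.join_singleton,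
        List.foldl_cons, List.foldl_nil, replS]
      rw [hb, hds]
      unfold sweepStep
      rw [set_at_len, get_at_len]
      simp [firstC, hds]
    | cons m r =>
      simp only [offsFrom, List.foldl_cons, List.map_cons]
      rw [PySem.Chars.join_cons_cons]
      rw [show pre ++ (w.toList ++ [' '] ++ PySem.Chars.join [' '] (m.toList :: List.map String.toList r))
            = pre ++ w.toList ++ ([' '] ++ PySem.Chars.join [' '] (m.toList :: List.map String.toList r)) by
          simp]
      rw [hds]
      rw [show pre ++ (d :: ds) ++ ([' '] ++ PySem.Chars.join [' '] (m.toList :: List.map String.toList r))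
            = pre ++ d :: (ds ++ [' '] ++ PySem.Chars.join [' '] (m.toList :: List.map String.toList r)) by
          simp]
      rw [hb]
      rw [show sweepStep (pre ++ d :: (ds ++ [' '] ++ PySem.Chars.join [' '] (m.toList :: List.map String.toList r)), c) ((pre.length : Nat) : Int)
            = (pre ++ c :: (ds ++ [' '] ++ PySem.Chars.join [' '] (m.toList :: List.map String.toList r)), d) by
          unfold sweepStep
          rw [set_at_len, get_at_len]]
      rw [show pre ++ c :: (ds ++ [' '] ++ PySem.Chars.join [' '] (m.toList :: List.map String.toList r))
            = (pre ++ c :: ds ++ [' ']) ++ PySem.Chars.join [' '] (m.toList :: List.map String.toList r) by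
          simp]
      have hfw : firstC w = d := by simp [firstC, hds]
      have hih := ih (by simp) (fun v hv => hall v (by simp [hv]))
        (pre ++ c :: ds ++ [' ']) (pre.length + (d :: ds).length + 1)
        (by simp [Nat.add_assoc]) (firstC w)
      simp only [List.map_cons, offsFrom, List.foldl_cons, hfw] at hih
      rw [hih]
      simp only [replS, List.map_cons, String.toList_ofList]
      rw [PySem.Chars.join_cons_cons]
      rw [List.getLast_cons (l := m :: r) (by simp)]
      simp [hds, firstC]


theorem join_ofList (M : List String) :
    PySem.Str.join " " M = String.ofList (PySem.Chars.join [' '] (M.map String.toList)) := by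
  have h2 : (PySem.Str.join " " M).toList = PySem.Chars.join [' '] (M.map String.toList) := by
    rw [PySem.Str.toList_join]; rfl
  have h4 : String.ofList ((PySem.Str.join " " M).toList) = PySem.Str.join " " M :=
    String.ofList_toList
  exact h4.symm.trans (congrArg String.ofList h2)


-- ===== VERDICT =====
theorem shift_sentence_spec : Claim_equal_shift_sentence := by
  intro txt _
  unfold Spec_shift_sentence shift_sentence shift_sentence_alt
  simp only []
  cases hws : PySem.Str.split₀ txt with
  | nil => decide
  | cons w ws =>
    have hne : (w :: ws) ≠ [] := by simp
    have hall := split₀_words_ne txt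
    rw [hws] at hall
    rw [PySem.List.foldl_append_singleton_eq_map, List.nil_append]
    rw [A_core (w :: ws) hne hall]
    rw [if_neg hne]
    rw [PySem.List.slice_to_neg_one]
    have hchars : (PySem.Str.join " " (w :: ws)).toList
        = PySem.Chars.join [' '] ((w :: ws).map String.toList) := by
      rw [PySem.Str.toList_join]; rfl
    rw [hchars]
    have hst : (List.dropLast (w :: ws)).foldl
        (fun st v => st ++ [PySem.List.pyGetD st (-1) 0 + PySem.Str.len v + 1]) [(0 : Int)]
        = offsFrom 0 (w :: ws) := by
      rw [show [(0 : Int)] = ([] : List Int) ++ [(((0 : Nat)) : Int)] by simp]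
      rw [offs_foldl, offsAux_dropLast _ hne]
      simp
    rw [hst]
    rw [PySem.List.pyGetD_neg_one _ _ (offsFrom_ne_nil _ hne _)]
    have hc := carry_init (w :: ws) hne hall [] 0 rfl (offsFrom_ne_nil _ hne _)
    rw [List.nil_append] at hc
    rw [hc]
    have hsw := sweep_main (w :: ws) hne hall [] 0 rfl (firstC ((w :: ws).getLast hne))
    rw [List.nil_append, List.nil_append] at hsw
    show PySem.Str.join " " (replS (firstC ((w :: ws).getLast hne)) (w :: ws))
        = String.ofList ((offsFrom 0 (w :: ws)).foldl sweepStep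
            (PySem.Chars.join [' '] ((w :: ws).map String.toList),
             firstC ((w :: ws).getLast hne))).1
    rw [hsw]
    exact join_ofList _
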